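-- pv_equiv track=rewrite | github.com/facuzavaleta/Python | AprendeConAlf/Examenes/2020-06-19-Ejercicio2.py | ordenador
-- ===== SOURCE A (Python) =====
-- def ordenador(lista):
--     pares = []
--     impares = []
--
--     for i in lista:
--         if i % 2 == 0:
--             pares.append(i)
--         else:
--             impares.append(i)
--     pares.sort()
--     impares.sort()
--
--     return f"Pares: {pares}\nImpares: {impares}"
-- ===== SOURCE B (Python) =====
-- def ordenador(lista):
--     s = sorted(lista)
--     pares = [x for x in s if x % 2 == 0]
--     impares = [x for x in s if x % 2 != 0]
--     return f"Pares: {pares}\nImpares: {impares}"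
-- ===== Notes on version B (the rewrite author's own statement) =====
-- stated objective: simpler
-- what changed: One sort of the whole list followed by two filter comprehensions replaces A's partition-loop followed by two separate sorts.
import Mathlib
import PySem

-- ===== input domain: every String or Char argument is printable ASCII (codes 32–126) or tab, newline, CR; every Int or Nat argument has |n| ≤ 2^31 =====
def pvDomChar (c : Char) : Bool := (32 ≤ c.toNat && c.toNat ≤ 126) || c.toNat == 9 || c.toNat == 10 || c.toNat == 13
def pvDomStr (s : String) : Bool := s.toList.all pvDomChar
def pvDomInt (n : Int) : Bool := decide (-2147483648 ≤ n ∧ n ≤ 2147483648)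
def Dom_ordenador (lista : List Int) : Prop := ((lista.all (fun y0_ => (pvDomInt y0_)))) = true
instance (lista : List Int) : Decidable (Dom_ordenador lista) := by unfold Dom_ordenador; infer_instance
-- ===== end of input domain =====

-- B replaces A's partition-then-two-sorts by one sort of the input followed by two filters (simpler decomposition; same output string).

-- Shared formatting helper: Python's f"{lst}" for a list of ints, e.g. "[-2, 0]" — hand-ported, exact for int lists.
def pyReprIntList (xs : List Int) : String :=
  "[" ++ String.intercalate ", " (xs.map PySem.Int.toStr) ++ "]"

-- ===== PORT A =====
def ordenador (lista : List Int) : String :=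
  let st := lista.foldl
    (fun (s : List Int × List Int) i =>
      if PySem.Int.mod i 2 = 0 then (s.1 ++ [i], s.2) else (s.1, s.2 ++ [i]))
    ([], [])
  let pares := PySem.List.sorted st.1 (fun x => x) false
  let impares := PySem.List.sorted st.2 (fun x => x) false
  "Pares: " ++ pyReprIntList pares ++ "\nImpares: " ++ pyReprIntList impares

-- ===== PORT B =====
def ordenador_alt (lista : List Int) : String :=
  let s := PySem.List.sorted lista (fun x => x) false
  let pares := s.filter (fun x => decide (PySem.Int.mod x 2 = 0))
  let impares := s.filter (fun x => !decide (PySem.Int.mod x 2 = 0))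
  "Pares: " ++ pyReprIntList pares ++ "\nImpares: " ++ pyReprIntList impares

-- ===== PRECONDITION & SPEC =====
def Spec_ordenador (lista : List Int) (out : String) : Prop := out = ordenador_alt lista
instance (lista : List Int) (out : String) : Decidable (Spec_ordenador lista out) := by unfold Spec_ordenador; infer_instance

-- ===== CLAIM (what is proved, stated in full; the proofs are below) =====
def Claim_equal_ordenador : Prop := ∀ (lista : List Int), Dom_ordenador lista → Spec_ordenador lista (ordenador lista)

-- ===== LEMMAS AND PROOFS =====

-- A's partition loop computes the two filters of the input.
theorem foldl_partition (xs p i : List Int) :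
    xs.foldl (fun (s : List Int × List Int) x =>
        if PySem.Int.mod x 2 = 0 then (s.1 ++ [x], s.2) else (s.1, s.2 ++ [x])) (p, i)
      = (p ++ xs.filter (fun x => decide (PySem.Int.mod x 2 = 0)),
         i ++ xs.filter (fun x => !decide (PySem.Int.mod x 2 = 0))) := by
  induction xs generalizing p i with
  | nil => simp
  | cons x xs ih =>
    by_cases h : PySem.Int.mod x 2 = 0 <;>
      simp only [List.foldl_cons, List.filter_cons, h, if_pos, decide_true,
        decide_false, Bool.not_true, Bool.not_false, if_false, ih,
        List.append_assoc, List.singleton_append] <;>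
      simp [Bool.false_eq_true]

-- sorting then filtering equals filtering then sorting (key = identity).
theorem sorted_filter (xs : List Int) (q : Int → Bool) :
    PySem.List.sorted (xs.filter q) (fun x => x) false
      = (PySem.List.sorted xs (fun x => x) false).filter q := by
  apply PySem.List.sorted_id_eq_of_perm_of_pairwise
  · exact (PySem.List.sorted_perm xs (fun x => x) false).filter q
  · exact (PySem.List.sorted_pairwise xs (fun x => x)).filter q

-- ===== VERDICT (by name: the statement is the Claim_ definition above) =====
theorem ordenador_spec : Claim_equal_ordenador := by
  intro lista _
  show _ = _
  unfold ordenador ordenador_alt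
  rw [foldl_partition lista [] []]
  simp only [List.nil_append]
  rw [sorted_filter, sorted_filter]
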